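-- pv_equiv track=rewrite | github.com/marcin119a/labs_bioinformatics_ads | laby8/ex5.py | LiczbaDrog
-- ===== SOURCE A (Python) =====
-- def LiczbaDrog(Plansza):
--     m = len(Plansza)
--     n = len(Plansza[0])
--
--     # Tworzymy tablicę dp, gdzie dp[i][j] oznacza liczbę ścieżek do punktu (i, j)
--     dp = [[0] * n for _ in range(m)]
--
--     # Początkowy punkt ma jedną możliwą ścieżkę (zakładając, że zaczynamy na tym polu)
--     dp[0][0] = 1
--
--     # Wypełnianie tablicy dp
--     for i in range(m):
--         for j in range(n):
--             # Sprawdzamy możliwość przejścia w dół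
--             if i + 1 < m and Plansza[i + 1][j] != Plansza[i][j]:
--                 dp[i + 1][j] += dp[i][j]
--
--             # Sprawdzamy możliwość przejścia w prawo
--             if j + 1 < n and Plansza[i][j + 1] != Plansza[i][j]:
--                 dp[i][j + 1] += dp[i][j]
--
--     # Wynik znajduje się w prawym górnym rogu
--     return dp[m - 1][n - 1]
-- ===== SOURCE B (Python) =====
-- def LiczbaDrog(Plansza):
--     m, n = len(Plansza), len(Plansza[0])
--     # anti-diagonal wavefront: prev holds path counts along diagonal d-1
--     prev = [1]
--     for d in range(1, m + n - 1):
--         lo = max(0, d - m + 1)   # smallest column j on diagonal d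
--         hi = min(d, n - 1)       # largest column j on diagonal d
--         plo = max(0, d - m)      # smallest column on diagonal d - 1
--         cur = []
--         for j in range(lo, hi + 1):
--             i = d - j
--             v = 0
--             if i > 0 and Plansza[i][j] != Plansza[i - 1][j]:
--                 v += prev[j - plo]
--             if j > 0 and Plansza[i][j] != Plansza[i][j - 1]:
--                 v += prev[j - 1 - plo]
--             cur.append(v)
--         prev = cur
--     return prev[-1]
-- ===== Notes on version B (the rewrite author's own statement) =====
-- stated objective: alternative
-- what changed: B replaces A's push-style full m×n dp table (adding dp[i][j] into its successors) by a pull-style anti-diagonal wavefront that keeps only the previous diagonal and computes each cell from its two predecessors.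
import Mathlib
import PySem

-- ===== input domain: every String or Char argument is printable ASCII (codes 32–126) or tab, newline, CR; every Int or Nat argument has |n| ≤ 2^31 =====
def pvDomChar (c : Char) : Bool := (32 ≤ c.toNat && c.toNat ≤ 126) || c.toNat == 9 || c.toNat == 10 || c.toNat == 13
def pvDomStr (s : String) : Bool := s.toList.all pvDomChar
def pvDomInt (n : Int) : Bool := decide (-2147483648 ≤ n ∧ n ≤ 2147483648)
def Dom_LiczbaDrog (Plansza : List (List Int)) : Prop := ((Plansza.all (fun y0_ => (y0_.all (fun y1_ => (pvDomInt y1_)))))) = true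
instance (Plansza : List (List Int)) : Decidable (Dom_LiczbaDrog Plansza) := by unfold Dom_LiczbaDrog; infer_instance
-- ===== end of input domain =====

-- B replaces A's push-style full m×n dp table by a pull-style anti-diagonal wavefront that keeps
-- only the previous diagonal (objective: alternative traversal, O(min(m,n)) extra space; not claimed faster).

-- ===== PORT A =====
-- grid access Plansza[i][j] (indices are always in range on admitted inputs; getD is exact there)
def get2 (P : List (List Int)) (i j : Nat) : Int := (P.getD i []).getD j 0

-- dp[i][j] = v  (in-range on all uses made by the ports)
def upd2 (dp : List (List Int)) (i j : Nat) (v : Int) : List (List Int) :=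
  dp.set i ((dp.getD i []).set j v)

-- body of A's inner loop at cell (i, j): push dp[i][j] down and right
def stepA (P : List (List Int)) (m n i : Nat) (dp : List (List Int)) (j : Nat) : List (List Int) :=
  let dp1 := if i + 1 < m ∧ get2 P (i+1) j ≠ get2 P i j
             then upd2 dp (i+1) j (get2 dp (i+1) j + get2 dp i j) else dp
  if j + 1 < n ∧ get2 P i (j+1) ≠ get2 P i j
             then upd2 dp1 i (j+1) (get2 dp1 i (j+1) + get2 dp1 i j) else dp1

-- A's inner loop: for j in range(n)
def rowA (P : List (List Int)) (m n : Nat) (dp : List (List Int)) (i : Nat) : List (List Int) :=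
  (List.range n).foldl (stepA P m n i) dp

def LiczbaDrog (Plansza : List (List Int)) : Int :=
  let m := Plansza.length
  let n := (Plansza.headD []).length
  let dp0 := List.replicate m (List.replicate n (0 : Int))
  let dp1 := upd2 dp0 0 0 1
  let dp := (List.range m).foldl (rowA Plansza m n) dp1
  get2 dp (m-1) (n-1)

-- ===== PORT B =====
-- body of B's inner loop: value of cell (d-j, j) pulled from diagonal d-1 (prev), appended to cur
def cellB (P : List (List Int)) (d plo : Nat) (prev cur : List Int) (j : Nat) : List Int :=
  let i := d - j
  let v : Int := 0
  let v := if 0 < i ∧ get2 P i j ≠ get2 P (i-1) j then v + prev.getD (j - plo) 0 else v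
  let v := if 0 < j ∧ get2 P i j ≠ get2 P i (j-1) then v + prev.getD (j - 1 - plo) 0 else v
  cur ++ [v]

-- one anti-diagonal d (columns j = lo..hi), built from diagonal d-1
def diagB (P : List (List Int)) (m n : Nat) (prev : List Int) (d : Nat) : List Int :=
  let lo := d + 1 - m
  let hi := min d (n - 1)
  let plo := d - m
  (List.range' lo (hi + 1 - lo)).foldl (cellB P d plo prev) []

def LiczbaDrog_alt (Plansza : List (List Int)) : Int :=
  let m := Plansza.length
  let n := (Plansza.headD []).length
  let prev := (List.range' 1 (m + n - 2)).foldl (diagB Plansza m n) [1]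
  prev.getD (prev.length - 1) 0

-- ===== PRECONDITION & SPEC =====
-- Pre_ excludes exactly the inputs on which Python A raises IndexError: the empty grid, an empty
-- first row, and grids where some row is shorter than the first row.
def Pre_LiczbaDrog (Plansza : List (List Int)) : Prop :=
  Plansza ≠ [] ∧ 0 < (Plansza.headD []).length ∧
    ∀ r ∈ Plansza, (Plansza.headD []).length ≤ r.length

instance (Plansza : List (List Int)) : Decidable (Pre_LiczbaDrog Plansza) := by
  unfold Pre_LiczbaDrog; infer_instance

def pvWitness_LiczbaDrog : List (List Int) := [[0, 1], [1, 0]]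

def Spec_LiczbaDrog (Plansza : List (List Int)) (out : Int) : Prop := out = LiczbaDrog_alt Plansza
instance (Plansza : List (List Int)) (out : Int) : Decidable (Spec_LiczbaDrog Plansza out) := by
  unfold Spec_LiczbaDrog; infer_instance

-- ===== CLAIM (what is proved, stated in full; the proofs are below) =====
def Claim_equal_LiczbaDrog : Prop := ∀ (Plansza : List (List Int)), Dom_LiczbaDrog Plansza → Pre_LiczbaDrog Plansza → Spec_LiczbaDrog Plansza (LiczbaDrog Plansza)

-- ===== LEMMAS AND PROOFS =====

-- the common mathematical spec: fB P i j = number of valid paths from (0,0) to (i,j)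
def fB (P : List (List Int)) (i j : Nat) : Int :=
  (if i = 0 ∧ j = 0 then (1 : Int) else 0)
  + (if h : 0 < i ∧ get2 P i j ≠ get2 P (i-1) j then fB P (i-1) j else 0)
  + (if h : 0 < j ∧ get2 P i j ≠ get2 P i (j-1) then fB P i (j-1) else 0)
termination_by (i, j)
decreasing_by
  · exact Prod.Lex.left _ _ (by omega)
  · exact Prod.Lex.right _ (by omega)

-- intended dp content after k cell-steps of A's row-major sweep (cells with flat index < k processed)
def dval (P : List (List Int)) (n k a b : Nat) : Int :=
  (if a = 0 ∧ b = 0 then (1 : Int) else 0)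
  + (if 0 < a ∧ (a-1)*n + b < k ∧ get2 P a b ≠ get2 P (a-1) b then fB P (a-1) b else 0)
  + (if 0 < b ∧ a*n + (b-1) < k ∧ get2 P a b ≠ get2 P a (b-1) then fB P a (b-1) else 0)

def ShapeA (dp : List (List Int)) (m n : Nat) : Prop :=
  dp.length = m ∧ ∀ r ∈ dp, r.length = n

def SimA (P dp : List (List Int)) (m n k : Nat) : Prop :=
  ShapeA dp m n ∧ ∀ a b, a < m → b < n → get2 dp a b = dval P n k a b

theorem shape_upd2 {dp : List (List Int)} {m n i j : Nat} (hi : i < m)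
    (h : ShapeA dp m n) (v : Int) : ShapeA (upd2 dp i j v) m n := by
  obtain ⟨hlen, hrow⟩ := h
  refine ⟨by simp [upd2, hlen], ?_⟩
  intro r hr
  rcases List.mem_or_eq_of_mem_set hr with h1 | h1
  · exact hrow r h1
  · subst h1
    rw [List.length_set]
    have hidp : i < dp.length := by omega
    have hgd : dp.getD i [] = dp[i] := by simp [List.getD, List.getElem?_eq_getElem hidp]
    rw [hgd]; exact hrow _ (List.getElem_mem hidp)

theorem get2_upd2 {dp : List (List Int)} {m n i j : Nat} (hi : i < m) (hj : j < n)
    (h : ShapeA dp m n) (v : Int) (a b : Nat) :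
    get2 (upd2 dp i j v) a b = if a = i ∧ b = j then v else get2 dp a b := by
  obtain ⟨hlen, hrow⟩ := h
  have hidp : i < dp.length := by omega
  have hgd : dp.getD i [] = dp[i] := by simp [List.getD, List.getElem?_eq_getElem hidp]
  have hrl : (dp.getD i []).length = n := by rw [hgd]; exact hrow _ (List.getElem_mem hidp)
  by_cases hai : a = i
  · subst hai
    have houter : (dp.set a ((dp.getD a []).set j v)).getD a [] = (dp.getD a []).set j v := by
      simp [List.getD, hidp]
    by_cases hbj : b = j
    · subst hbj
      simp only [get2, upd2, houter]
      have hb' : b < (dp.getD a []).length := by omega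
      rw [show ((dp.getD a []).set b v).getD b 0 = v from by
        rw [List.getD, List.getElem?_set_self (by simpa using hb')]; rfl]
      simp
    · simp only [get2, upd2, houter]
      rw [show ((dp.getD a []).set j v).getD b 0 = (dp.getD a []).getD b 0 from by
        simp [List.getD, List.getElem?_set_ne (by omega : j ≠ b)]]
      simp [hbj, get2]
  · simp only [get2, upd2]
    rw [show (dp.set i ((dp.getD i []).set j v)).getD a [] = dp.getD a [] from by
      simp [List.getD, List.getElem?_set_ne (by omega : i ≠ a)]]
    simp [hai, get2]

theorem flat_lt {a n : Nat} (ha : 0 < a) :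
    (a-1)*n + n = a*n := by
  cases a with
  | zero => omega
  | succ a' => simp [Nat.succ_mul]

theorem flat_inj {a b i j n : Nat} (hb : b < n) (hj : j < n) :
    a*n + b = i*n + j ↔ a = i ∧ b = j := by
  constructor
  · intro h
    have hb' : (a*n + b) % n = b := by
      rw [Nat.mul_add_mod']; exact Nat.mod_eq_of_lt hb
    have hj' : (i*n + j) % n = j := by
      rw [Nat.mul_add_mod']; exact Nat.mod_eq_of_lt hj
    have hbj : b = j := by rw [← hb', ← hj', h]
    subst hbj
    have : a * n = i * n := by omega
    have : a = i := Nat.eq_of_mul_eq_mul_right (by omega) this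
    exact ⟨this, rfl⟩
  · rintro ⟨rfl, rfl⟩; rfl

theorem dval_eq_fB {P : List (List Int)} {n k a b : Nat}
    (h1 : 0 < a → (a-1)*n + b < k) (h2 : 0 < b → a*n + (b-1) < k) :
    dval P n k a b = fB P a b := by
  have e2 : (if 0 < a ∧ (a-1)*n + b < k ∧ get2 P a b ≠ get2 P (a-1) b then fB P (a-1) b else 0)
      = (if _ : 0 < a ∧ get2 P a b ≠ get2 P (a-1) b then fB P (a-1) b else 0) := by
    by_cases ha : 0 < a
    · by_cases hne : get2 P a b ≠ get2 P (a-1) b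
      · rw [if_pos ⟨ha, h1 ha, hne⟩, dif_pos ⟨ha, hne⟩]
      · rw [if_neg (by tauto), dif_neg (by tauto)]
    · rw [if_neg (by tauto), dif_neg (by tauto)]
  have e3 : (if 0 < b ∧ a*n + (b-1) < k ∧ get2 P a b ≠ get2 P a (b-1) then fB P a (b-1) else 0)
      = (if _ : 0 < b ∧ get2 P a b ≠ get2 P a (b-1) then fB P a (b-1) else 0) := by
    by_cases hb : 0 < b
    · by_cases hne : get2 P a b ≠ get2 P a (b-1)
      · rw [if_pos ⟨hb, h2 hb, hne⟩, dif_pos ⟨hb, hne⟩]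
      · rw [if_neg (by tauto), dif_neg (by tauto)]
    · rw [if_neg (by tauto), dif_neg (by tauto)]
  unfold dval
  rw [e2, e3]
  conv_rhs => rw [fB]

theorem dval_X0 {P : List (List Int)} {n k i j : Nat} (hj : j < n) (hk : k = i*n + j) :
    dval P n k (i+1) j = 0 := by
  have hsm : (i+1)*n = i*n + n := Nat.succ_mul i n
  unfold dval
  simp only [Nat.add_sub_cancel]
  rw [if_neg (by omega), if_neg (by rintro ⟨-, h2, -⟩; omega),
    if_neg (by rintro ⟨h1, h2, -⟩; omega)]
  norm_num

theorem dval_X1 {P : List (List Int)} {n k i j : Nat} (hj : j < n) (hk : k = i*n + j) :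
    dval P n (k+1) (i+1) j = if get2 P (i+1) j ≠ get2 P i j then fB P i j else 0 := by
  have hsm : (i+1)*n = i*n + n := Nat.succ_mul i n
  unfold dval
  simp only [Nat.add_sub_cancel]
  rw [if_neg (show ¬((i+1) = 0 ∧ j = 0) by omega)]
  by_cases hne : get2 P (i+1) j ≠ get2 P i j
  · rw [if_pos ⟨by omega, by omega, hne⟩, if_neg (by rintro ⟨h1, h2, -⟩; omega), if_pos hne]
    ring
  · rw [if_neg (by tauto), if_neg (by rintro ⟨h1, h2, -⟩; omega), if_neg hne]
    ring

theorem dval_Y {P : List (List Int)} {n k i j : Nat} (hj1 : j + 1 < n) (hk : k = i*n + j) :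
    dval P n (k+1) i (j+1) =
      dval P n k i (j+1) + (if get2 P i (j+1) ≠ get2 P i j then fB P i j else 0) := by
  unfold dval
  simp only [Nat.add_sub_cancel]
  have ht2 : (if 0 < i ∧ (i-1)*n + (j+1) < k+1 ∧ get2 P i (j+1) ≠ get2 P (i-1) (j+1) then fB P (i-1) (j+1) else 0)
      = (if 0 < i ∧ (i-1)*n + (j+1) < k ∧ get2 P i (j+1) ≠ get2 P (i-1) (j+1) then fB P (i-1) (j+1) else 0) := by
    by_cases hi0 : 0 < i
    · have hsm := flat_lt (a := i) (n := n) hi0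
      by_cases hne : get2 P i (j+1) ≠ get2 P (i-1) (j+1)
      · rw [if_pos ⟨hi0, by omega, hne⟩, if_pos ⟨hi0, by omega, hne⟩]
      · rw [if_neg (by tauto), if_neg (by tauto)]
    · rw [if_neg (by tauto), if_neg (by tauto)]
  have hT1 : (if 0 < j+1 ∧ i*n + j < k+1 ∧ get2 P i (j+1) ≠ get2 P i j then fB P i j else 0)
      = (if get2 P i (j+1) ≠ get2 P i j then fB P i j else 0) := by
    by_cases hne : get2 P i (j+1) ≠ get2 P i j
    · rw [if_pos ⟨by omega, by omega, hne⟩, if_pos hne]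
    · rw [if_neg (by tauto), if_neg hne]
  have hT0 : (if 0 < j+1 ∧ i*n + j < k ∧ get2 P i (j+1) ≠ get2 P i j then fB P i j else 0)
      = 0 := if_neg (by rintro ⟨-, h2, -⟩; omega)
  rw [ht2, hT1, hT0]
  ring

theorem dval_Z {P : List (List Int)} {n k i j a b : Nat} (hb : b < n) (hj : j < n)
    (hk : k = i*n + j) (hX : ¬(a = i+1 ∧ b = j)) (hY : ¬(a = i ∧ b = j+1)) :
    dval P n (k+1) a b = dval P n k a b := by
  unfold dval
  have ht2 : (if 0 < a ∧ (a-1)*n + b < k+1 ∧ get2 P a b ≠ get2 P (a-1) b then fB P (a-1) b else 0)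
      = (if 0 < a ∧ (a-1)*n + b < k ∧ get2 P a b ≠ get2 P (a-1) b then fB P (a-1) b else 0) := by
    by_cases ha : 0 < a
    · have hne' : (a-1)*n + b ≠ k := by
        intro hEq
        have := (flat_inj (a := a-1) (b := b) (i := i) (j := j) hb hj).mp (by omega)
        exact hX ⟨by omega, this.2⟩
      by_cases hne : get2 P a b ≠ get2 P (a-1) b
      · by_cases hlt : (a-1)*n + b < k
        · rw [if_pos ⟨ha, by omega, hne⟩, if_pos ⟨ha, hlt, hne⟩]
        · rw [if_neg (by rintro ⟨-, h2, -⟩; omega), if_neg (by tauto)]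
      · rw [if_neg (by tauto), if_neg (by tauto)]
    · rw [if_neg (by tauto), if_neg (by tauto)]
  have ht3 : (if 0 < b ∧ a*n + (b-1) < k+1 ∧ get2 P a b ≠ get2 P a (b-1) then fB P a (b-1) else 0)
      = (if 0 < b ∧ a*n + (b-1) < k ∧ get2 P a b ≠ get2 P a (b-1) then fB P a (b-1) else 0) := by
    by_cases hb0 : 0 < b
    · have hne' : a*n + (b-1) ≠ k := by
        intro hEq
        have := (flat_inj (a := a) (b := b-1) (i := i) (j := j) (by omega) hj).mp (by omega)
        exact hY ⟨this.1, by omega⟩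
      by_cases hne : get2 P a b ≠ get2 P a (b-1)
      · by_cases hlt : a*n + (b-1) < k
        · rw [if_pos ⟨hb0, by omega, hne⟩, if_pos ⟨hb0, hlt, hne⟩]
        · rw [if_neg (by rintro ⟨-, h2, -⟩; omega), if_neg (by tauto)]
      · rw [if_neg (by tauto), if_neg (by tauto)]
    · rw [if_neg (by tauto), if_neg (by tauto)]
  rw [ht2, ht3]

theorem stepA_sim {P dp : List (List Int)} {m n i j : Nat} (hi : i < m) (hj : j < n)
    (h : SimA P dp m n (i*n + j)) :
    SimA P (stepA P m n i dp j) m n (i*n + j + 1) := by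
  obtain ⟨hsh, hval⟩ := h
  have hij : get2 dp i j = fB P i j := by
    rw [hval i j hi hj]
    exact dval_eq_fB
      (fun ha => by have := flat_lt (a := i) (n := n) ha; omega)
      (fun hb => by omega)
  show SimA P
    (if j + 1 < n ∧ get2 P i (j+1) ≠ get2 P i j
     then upd2 (if i + 1 < m ∧ get2 P (i+1) j ≠ get2 P i j
                then upd2 dp (i+1) j (get2 dp (i+1) j + get2 dp i j) else dp) i (j+1)
          (get2 (if i + 1 < m ∧ get2 P (i+1) j ≠ get2 P i j
                then upd2 dp (i+1) j (get2 dp (i+1) j + get2 dp i j) else dp) i (j+1)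
           + get2 (if i + 1 < m ∧ get2 P (i+1) j ≠ get2 P i j
                then upd2 dp (i+1) j (get2 dp (i+1) j + get2 dp i j) else dp) i j)
     else (if i + 1 < m ∧ get2 P (i+1) j ≠ get2 P i j
                then upd2 dp (i+1) j (get2 dp (i+1) j + get2 dp i j) else dp))
    m n (i*n + j + 1)
  set D1 := (if i + 1 < m ∧ get2 P (i+1) j ≠ get2 P i j
             then upd2 dp (i+1) j (get2 dp (i+1) j + get2 dp i j) else dp) with hD1def
  have hD1sh : ShapeA D1 m n := by
    rw [hD1def]; split_ifs with h1
    · exact shape_upd2 h1.1 hsh _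
    · exact hsh
  have hD1 : ∀ a b, get2 D1 a b =
      if a = i+1 ∧ b = j ∧ i+1 < m
      then get2 dp a b + (if get2 P (i+1) j ≠ get2 P i j then fB P i j else 0)
      else get2 dp a b := by
    intro a b
    rw [hD1def]
    by_cases h1 : i + 1 < m ∧ get2 P (i+1) j ≠ get2 P i j
    · rw [if_pos h1, get2_upd2 h1.1 hj hsh]
      by_cases hX : a = i+1 ∧ b = j
      · rw [if_pos hX, if_pos ⟨hX.1, hX.2, h1.1⟩, if_pos h1.2]
        rcases hX with ⟨rfl, rfl⟩
        rw [hij]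
      · rw [if_neg hX, if_neg (by tauto)]
    · rw [if_neg h1]
      by_cases hX : a = i+1 ∧ b = j ∧ i+1 < m
      · rw [if_pos hX, if_neg (fun hne => h1 ⟨hX.2.2, hne⟩), add_zero]
      · rw [if_neg hX]
  have hD1ij : get2 D1 i j = fB P i j := by
    rw [hD1 i j, if_neg (by omega), hij]
  have hD1ij1 : get2 D1 i (j+1) = get2 dp i (j+1) := by
    rw [hD1 i (j+1), if_neg (by omega)]
  constructor
  · by_cases h2 : j + 1 < n ∧ get2 P i (j+1) ≠ get2 P i j
    · rw [if_pos h2]; exact shape_upd2 hi hD1sh _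
    · rw [if_neg h2]; exact hD1sh
  · intro a b ha hb
    have hdp2 : get2 (if j + 1 < n ∧ get2 P i (j+1) ≠ get2 P i j
        then upd2 D1 i (j+1) (get2 D1 i (j+1) + get2 D1 i j) else D1) a b =
        if a = i+1 ∧ b = j
        then get2 dp a b + (if get2 P (i+1) j ≠ get2 P i j then fB P i j else 0)
        else if a = i ∧ b = j+1
        then get2 dp a b + (if get2 P i (j+1) ≠ get2 P i j then fB P i j else 0)
        else get2 dp a b := by
      by_cases h2 : j + 1 < n ∧ get2 P i (j+1) ≠ get2 P i j
      · rw [if_pos h2, get2_upd2 hi h2.1 hD1sh]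
        by_cases hY : a = i ∧ b = j+1
        · rcases hY with ⟨rfl, rfl⟩
          rw [if_pos ⟨rfl, rfl⟩, hD1ij1, hD1ij, if_neg (by omega), if_pos ⟨rfl, rfl⟩,
            if_pos h2.2]
        · rw [if_neg hY, hD1 a b]
          by_cases hX : a = i+1 ∧ b = j
          · rw [if_pos ⟨hX.1, hX.2, by omega⟩, if_pos hX]
          · rw [if_neg (by tauto), if_neg hX, if_neg hY]
      · rw [if_neg h2, hD1 a b]
        by_cases hX : a = i+1 ∧ b = j
        · rw [if_pos ⟨hX.1, hX.2, by omega⟩, if_pos hX]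
        · rw [if_neg (by tauto), if_neg hX]
          by_cases hY : a = i ∧ b = j+1
          · rw [if_pos hY]
            rw [if_neg (fun hne => h2 ⟨by omega, hne⟩), add_zero]
          · rw [if_neg hY]
    rw [hdp2]
    by_cases hX : a = i+1 ∧ b = j
    · have ha' : i + 1 < m := hX.1 ▸ ha
      rw [if_pos hX, hX.1, hX.2, hval (i+1) j ha' hj, dval_X0 hj rfl, dval_X1 hj rfl]
      ring
    · rw [if_neg hX]
      by_cases hY : a = i ∧ b = j+1
      · have hb' : j + 1 < n := hY.2 ▸ hb
        rw [if_pos hY, hY.1, hY.2, hval i (j+1) hi hb', dval_Y hb' rfl]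
      · rw [if_neg hY, hval a b ha hb, dval_Z hb hj rfl hX hY]

theorem innerA_sim {P : List (List Int)} {m n i : Nat} (hi : i < m) :
    ∀ (cnt j0 : Nat) (dp : List (List Int)), j0 + cnt = n →
      SimA P dp m n (i*n + j0) →
      SimA P ((List.range' j0 cnt).foldl (stepA P m n i) dp) m n (i*n + n) := by
  intro cnt
  induction cnt with
  | zero =>
    intro j0 dp hsum hsim
    have : j0 = n := by omega
    subst this
    simpa using hsim
  | succ c ih =>
    intro j0 dp hsum hsim
    rw [List.range'_succ, List.foldl_cons]
    refine ih (j0+1) _ (by omega) ?_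
    have hj0 : j0 < n := by omega
    have h1 := stepA_sim hi hj0 hsim
    rw [show i*n + (j0+1) = i*n + j0 + 1 by omega]
    exact h1

theorem outerA_sim {P : List (List Int)} {m n : Nat} :
    ∀ (cnt i0 : Nat) (dp : List (List Int)), i0 + cnt = m →
      SimA P dp m n (i0*n) →
      SimA P ((List.range' i0 cnt).foldl (rowA P m n) dp) m n (m*n) := by
  intro cnt
  induction cnt with
  | zero =>
    intro i0 dp hsum hsim
    have : i0 = m := by omega
    subst this
    simpa using hsim
  | succ c ih =>
    intro i0 dp hsum hsim
    rw [List.range'_succ, List.foldl_cons]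
    refine ih (i0+1) _ (by omega) ?_
    have hi0 : i0 < m := by omega
    have h1 : SimA P (rowA P m n dp i0) m n (i0*n + n) := by
      unfold rowA
      rw [List.range_eq_range']
      exact innerA_sim hi0 n 0 dp (by omega) (by simpa using hsim)
    rw [show (i0+1)*n = i0*n + n from Nat.succ_mul i0 n]
    exact h1

theorem initA_sim {P : List (List Int)} {m n : Nat} (hm : 0 < m) (hn : 0 < n) :
    SimA P (upd2 (List.replicate m (List.replicate n (0 : Int))) 0 0 1) m n 0 := by
  have hsh0 : ShapeA (List.replicate m (List.replicate n (0 : Int))) m n := by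
    refine ⟨List.length_replicate, ?_⟩
    intro r hr
    rw [List.eq_of_mem_replicate hr]
    exact List.length_replicate
  refine ⟨shape_upd2 hm hsh0 1, ?_⟩
  intro a b ha hb
  rw [get2_upd2 hm hn hsh0 1 a b]
  have hrep : get2 (List.replicate m (List.replicate n (0 : Int))) a b = 0 := by
    simp [get2, List.getD, List.getElem?_replicate, ha, hb]
  have hdval : dval P n 0 a b = if a = 0 ∧ b = 0 then 1 else 0 := by
    simp [dval]
  rw [hdval, hrep]

theorem lemA {P : List (List Int)} (hm : 0 < P.length) (hn : 0 < (P.headD []).length) :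
    LiczbaDrog P = fB P (P.length - 1) ((P.headD []).length - 1) := by
  show get2 ((List.range P.length).foldl (rowA P P.length ((P.headD []).length))
      (upd2 (List.replicate P.length (List.replicate ((P.headD []).length) (0 : Int))) 0 0 1))
      (P.length - 1) ((P.headD []).length - 1) = _
  rw [List.range_eq_range']
  have hfin := outerA_sim (P := P) (m := P.length) (n := (P.headD []).length)
      P.length 0
      (upd2 (List.replicate P.length (List.replicate ((P.headD []).length) (0 : Int))) 0 0 1)
      (by omega)
      (by simpa using initA_sim (P := P) hm hn)
  obtain ⟨-, hval⟩ := hfin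
  rw [hval (P.length - 1) ((P.headD []).length - 1) (by omega) (by omega)]
  set m := P.length
  set n := (P.headD []).length
  have e1 : (m-1)*n + n = m*n := flat_lt (a := m) hm
  refine dval_eq_fB (fun ha => ?_) (fun hb => ?_)
  · have e2 : (m-1-1)*n + n = (m-1)*n := flat_lt (a := m-1) ha
    omega
  · omega

-- B side
def diagSpec (P : List (List Int)) (m n d : Nat) : List Int :=
  (List.range' (d + 1 - m) (min d (n-1) + 1 - (d + 1 - m))).map (fun j => fB P (d - j) j)

theorem foldl_append_map {α : Type} (g : Nat → α) :
    ∀ (l : List Nat) (acc : List α),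
      l.foldl (fun c j => c ++ [g j]) acc = acc ++ l.map g := by
  intro l
  induction l with
  | nil => simp
  | cons x xs ih => intro acc; simp [List.foldl, ih]

def cellVal (P : List (List Int)) (d plo : Nat) (prev : List Int) (j : Nat) : Int :=
  if 0 < j ∧ get2 P (d-j) j ≠ get2 P (d-j) (j-1)
  then (if 0 < d-j ∧ get2 P (d-j) j ≠ get2 P (d-j-1) j
        then (0:Int) + prev.getD (j - plo) 0 else 0) + prev.getD (j - 1 - plo) 0
  else (if 0 < d-j ∧ get2 P (d-j) j ≠ get2 P (d-j-1) j
        then (0:Int) + prev.getD (j - plo) 0 else 0)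

theorem cellB_fun (P : List (List Int)) (d plo : Nat) (prev : List Int) :
    cellB P d plo prev = fun (cur : List Int) j => cur ++ [cellVal P d plo prev j] := by
  funext cur j
  rfl

theorem getD_map_range' (g : Nat → Int) (s c t : Nat) :
    ((List.range' s c).map g).getD t 0 = if t < c then g (s+t) else 0 := by
  rw [List.getD, List.getElem?_map]
  by_cases h : t < c
  · simp [h]
  · simp [h]

theorem cell_correct {P : List (List Int)} {m n d j : Nat} (hm : 0 < m) (hn : 0 < n)
    (hd1 : 1 ≤ d) (hlo : d + 1 - m ≤ j) (hhi : j ≤ min d (n-1)) :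
    cellVal P d (d-m) (diagSpec P m n (d-1)) j = fB P (d-j) j := by
  have hjd : j ≤ d := by omega
  have hjn1 : j ≤ n - 1 := by omega
  have hprev1 : 0 < d - j → (diagSpec P m n (d-1)).getD (j - (d-m)) 0 = fB P (d-j-1) j := by
    intro hij
    unfold diagSpec
    rw [getD_map_range']
    rw [if_pos (show j - (d-m) < min (d-1) (n-1) + 1 - ((d-1) + 1 - m) by omega)]
    rw [show (d-1) + 1 - m + (j - (d-m)) = j by omega]
    show fB P (d-1-j) j = fB P (d-j-1) j
    rw [show d-1-j = d-j-1 by omega]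
  have hprev2 : 0 < j → (diagSpec P m n (d-1)).getD (j - 1 - (d-m)) 0 = fB P (d-j) (j-1) := by
    intro hj0
    unfold diagSpec
    rw [getD_map_range']
    rw [if_pos (show j - 1 - (d-m) < min (d-1) (n-1) + 1 - ((d-1) + 1 - m) by omega)]
    rw [show (d-1) + 1 - m + (j - 1 - (d-m)) = j - 1 by omega]
    show fB P (d-1-(j-1)) (j-1) = fB P (d-j) (j-1)
    rw [show d-1-(j-1) = d-j by omega]
  conv_rhs => rw [fB]
  rw [if_neg (show ¬(d - j = 0 ∧ j = 0) by omega)]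
  unfold cellVal
  by_cases c1 : 0 < d - j ∧ get2 P (d-j) j ≠ get2 P (d-j-1) j <;>
    by_cases c2 : 0 < j ∧ get2 P (d-j) j ≠ get2 P (d-j) (j-1)
  · rw [if_pos c2, if_pos c1, dif_pos c1, dif_pos c2, hprev1 c1.1, hprev2 c2.1]
  · rw [if_neg c2, if_pos c1, dif_pos c1, dif_neg c2, hprev1 c1.1]
    ring
  · rw [if_pos c2, if_neg c1, dif_neg c1, dif_pos c2, hprev2 c2.1]
    ring
  · rw [if_neg c2, if_neg c1, dif_neg c1, dif_neg c2]
    ring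

theorem diagB_spec {P : List (List Int)} {m n d : Nat} (hm : 0 < m) (hn : 0 < n)
    (hd1 : 1 ≤ d) (hd2 : d ≤ m + n - 2) :
    diagB P m n (diagSpec P m n (d-1)) d = diagSpec P m n d := by
  show (List.range' (d + 1 - m) (min d (n-1) + 1 - (d + 1 - m))).foldl
      (cellB P d (d-m) (diagSpec P m n (d-1))) [] = diagSpec P m n d
  rw [cellB_fun, foldl_append_map, List.nil_append]
  unfold diagSpec
  apply List.map_congr_left
  intro j hj
  have hmem := List.mem_range'_1.mp hj
  exact cell_correct hm hn hd1 hmem.1 (by omega)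

theorem outerB_sim {P : List (List Int)} {m n : Nat} (hm : 0 < m) (hn : 0 < n) :
    ∀ (cnt d0 : Nat), d0 + cnt ≤ m + n - 2 →
      (List.range' (d0+1) cnt).foldl (diagB P m n) (diagSpec P m n d0) =
        diagSpec P m n (d0 + cnt) := by
  intro cnt
  induction cnt with
  | zero => intro d0 h; simp
  | succ c ih =>
    intro d0 h
    rw [List.range'_succ, List.foldl_cons]
    have hstep : diagB P m n (diagSpec P m n d0) (d0+1) = diagSpec P m n (d0+1) := by
      have := diagB_spec (P := P) (m := m) (n := n) (d := d0+1) hm hn (by omega) (by omega)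
      simpa using this
    rw [hstep]
    have := ih (d0+1) (by omega)
    rw [show d0 + 1 + c = d0 + (c+1) by omega] at this
    exact this

theorem fB_zero (P : List (List Int)) : fB P 0 0 = 1 := by
  rw [fB]
  norm_num

theorem lemB {P : List (List Int)} (hm : 0 < P.length) (hn : 0 < (P.headD []).length) :
    LiczbaDrog_alt P = fB P (P.length - 1) ((P.headD []).length - 1) := by
  show ((List.range' 1 (P.length + (P.headD []).length - 2)).foldl
      (diagB P P.length ((P.headD []).length)) [1]).getD
      (((List.range' 1 (P.length + (P.headD []).length - 2)).foldl
      (diagB P P.length ((P.headD []).length)) [1]).length - 1) 0 = _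
  set m := P.length with hmdef
  set n := (P.headD []).length with hndef
  have h0 : ([1] : List Int) = diagSpec P m n 0 := by
    unfold diagSpec
    rw [show 0 + 1 - m = 0 by omega, show min 0 (n-1) + 1 - 0 = 1 by omega,
      List.range'_one, List.map_cons, List.map_nil, show (0:Nat) - 0 = 0 by omega, fB_zero]
  have hfold : (List.range' 1 (m + n - 2)).foldl (diagB P m n) (diagSpec P m n 0) =
      diagSpec P m n (m + n - 2) := by
    have := outerB_sim (P := P) hm hn (m + n - 2) 0 (by omega)
    simpa using this
  have hfin : diagSpec P m n (m + n - 2) = [fB P (m-1) (n-1)] := by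
    unfold diagSpec
    rw [show m + n - 2 + 1 - m = n - 1 by omega,
      show min (m + n - 2) (n-1) + 1 - (n-1) = 1 by omega,
      List.range'_one, List.map_cons, List.map_nil,
      show m + n - 2 - (n-1) = m - 1 by omega]
  rw [h0, hfold, hfin]
  simp

-- ===== VERDICT (by name: the statement is the Claim_ definition above) =====
theorem LiczbaDrog_spec : Claim_equal_LiczbaDrog := by
  intro P _ hpre
  obtain ⟨hne, hn, _⟩ := hpre
  have hm : 0 < P.length := List.length_pos_iff.mpr hne
  unfold Spec_LiczbaDrog
  rw [lemA hm hn, lemB hm hn]
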